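-- pv_equiv track=rewrite | github.com/HKUST-KnowComp/BEKG | Annotation/Brat/brat.py | get_sentence_dict
-- ===== SOURCE A (Python) =====
-- def get_sentence_dict(sentences):
--     """Convert plain text into CoNLL format."""
--
--     sent_dict = {}
--     #sentences = []
--     '''
--     for l in f:
--         sent_split = l.split('\n')
--         for sent in sent_split:
--             if sent != '':
--                 sentences.append(sent+'\n')'''
--     offset = 0
--     for s in sentences:
--         offset += len(s)
--         sent_dict[s.strip()] = [offset - len(s), offset - 1]
--     return sent_dict
-- ===== SOURCE B (Python) =====
-- def get_sentence_dict(sentences):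
--     """Convert plain text into CoNLL format."""
--     def build(xs):
--         if len(xs) <= 1:
--             if not xs:
--                 return {}, 0
--             s = xs[0]
--             return {s.strip(): [0, len(s) - 1]}, len(s)
--         mid = len(xs) // 2
--         left, ltot = build(xs[:mid])
--         right, rtot = build(xs[mid:])
--         for k, v in right.items():
--             left[k] = [x + ltot for x in v]
--         return left, ltot + rtot
--     return build(sentences)[0]
-- ===== Notes on version B (the rewrite author's own statement) =====
-- stated objective: alternative
-- what changed: B builds the dict by divide and conquer: it recursively builds the dicts of the two halves of the list, each starting at offset 0, then merges the right half into the left shifting its ranges by the left half's total character length, instead of A's single forward loop threading a running offset through dict mutation.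
import Mathlib
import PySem

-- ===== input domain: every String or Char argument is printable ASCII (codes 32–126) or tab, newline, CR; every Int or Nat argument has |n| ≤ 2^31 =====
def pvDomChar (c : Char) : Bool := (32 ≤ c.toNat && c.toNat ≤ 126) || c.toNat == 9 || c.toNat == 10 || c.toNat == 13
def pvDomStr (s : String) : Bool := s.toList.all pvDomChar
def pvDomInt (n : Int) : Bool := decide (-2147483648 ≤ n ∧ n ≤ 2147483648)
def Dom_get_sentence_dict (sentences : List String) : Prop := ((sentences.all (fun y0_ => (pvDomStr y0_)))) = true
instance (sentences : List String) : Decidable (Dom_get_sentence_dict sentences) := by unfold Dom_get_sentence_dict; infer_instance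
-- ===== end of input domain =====

-- B computes the dict by DIVIDE AND CONQUER: it builds the dicts of the two halves independently
-- (each starting at offset 0) and merges them, shifting the right half's ranges by the left half's
-- total length (alternative algorithm; not measured faster).

-- ===== PORT A =====
def get_sentence_dict (sentences : List String) : List (String × List Int) :=
  (sentences.foldl
    (fun (st : Int × PySem.Dict String (List Int)) s =>
      let offset := st.1 + PySem.Str.len s
      (offset, st.2.insert (PySem.Str.strip s) [offset - PySem.Str.len s, offset - 1]))
    (0, PySem.Dict.empty)).2.items

-- ===== PORT B =====
-- B-side helper: build (dict, total length) for a slice of the sentence list (Source B's `build`).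
def pvBuild (xs : List String) : PySem.Dict String (List Int) × Int :=
  if _h : xs.length ≤ 1 then
    match xs with
    | [] => (PySem.Dict.empty, 0)
    | s :: _ => (PySem.Dict.empty.insert (PySem.Str.strip s) [0, PySem.Str.len s - 1], PySem.Str.len s)
  else
    let mid := xs.length / 2
    let l := pvBuild (xs.take mid)
    let r := pvBuild (xs.drop mid)
    (r.1.items.foldl (fun d p => d.insert p.1 (p.2.map (· + l.2))) l.1, l.2 + r.2)
termination_by xs.length
decreasing_by
  · simp only [List.length_take]; omega
  · simp only [List.length_drop]; omega

def get_sentence_dict_alt (sentences : List String) : List (String × List Int) :=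
  (pvBuild sentences).1.items

-- ===== PRECONDITION & SPEC =====
def Spec_get_sentence_dict (sentences : List String) (out : List (String × List Int)) : Prop := out = get_sentence_dict_alt sentences
instance (sentences : List String) (out : List (String × List Int)) : Decidable (Spec_get_sentence_dict sentences out) := by unfold Spec_get_sentence_dict; infer_instance

-- ===== CLAIM (what is proved, stated in full; the proofs are below) =====
def Claim_equal_get_sentence_dict : Prop := ∀ (sentences : List String), Dom_get_sentence_dict sentences → Spec_get_sentence_dict sentences (get_sentence_dict sentences)

-- ===== LEMMAS AND PROOFS =====

/-- The insert operations A performs, starting at offset `off`. -/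
def pvOps (off : Int) : List String → List (String × List Int)
  | [] => []
  | s :: t => (PySem.Str.strip s, [off, off + PySem.Str.len s - 1]) :: pvOps (off + PySem.Str.len s) t

/-- Replay an association list into a dict by repeated insertion. -/
def pvReplay (d : PySem.Dict String (List Int)) (ps : List (String × List Int)) : PySem.Dict String (List Int) :=
  ps.foldl (fun d p => d.insert p.1 p.2) d

/-- A's running-offset fold is the replay of its insert-operation list. -/
lemma pv_A_eq_replay (t : List String) (off : Int) (d : PySem.Dict String (List Int)) :
    (t.foldl
      (fun (st : Int × PySem.Dict String (List Int)) s =>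
        let offset := st.1 + PySem.Str.len s
        (offset, st.2.insert (PySem.Str.strip s) [offset - PySem.Str.len s, offset - 1]))
      (off, d)).2 = pvReplay d (pvOps off t) := by
  induction t generalizing off d with
  | nil => simp [pvOps, pvReplay]
  | cons s t ih =>
    simp only [List.foldl, pvOps, pvReplay, List.foldl_cons]
    rw [show off + PySem.Str.len s - PySem.Str.len s = off from by ring]
    exact ih _ _

/-- Shifting the start offset shifts every produced range. -/
lemma pv_ops_shift (t : List String) (x n : Int) :
    pvOps (x + n) t = (pvOps x t).map (fun p => (p.1, p.2.map (· + n))) := by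
  induction t generalizing x with
  | nil => simp [pvOps]
  | cons s t ih =>
    simp only [pvOps, List.map_cons, List.map_nil]
    rw [show x + n + PySem.Str.len s = x + PySem.Str.len s + n from by ring,
      ih (x + PySem.Str.len s),
      show x + PySem.Str.len s + n - 1 = x + PySem.Str.len s - 1 + n from by ring]

/-- Dict inserts at distinct keys commute when the second key is already present
    (its position is fixed, so insertion order no longer matters). -/
lemma pv_insert_comm (d : PySem.Dict String (List Int)) (k k' : String) (u v : List Int)
    (hc : d.contains k = true) (hne : k' ≠ k) :
    (d.insert k' u).insert k v = (d.insert k v).insert k' u := by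
  apply PySem.Dict.ext
  have hck : (d.insert k' u).contains k = true := by
    simp [PySem.Dict.contains_insert, hc]
  have hck' : (d.insert k v).contains k' = d.contains k' := by
    simp [PySem.Dict.contains_insert, hne]
  cases hc' : d.contains k' with
  | true =>
    rw [PySem.Dict.items_insert_of_contains _ v hck,
        PySem.Dict.items_insert_of_contains _ u hc',
        PySem.Dict.items_insert_of_contains _ u (hck'.trans hc'),
        PySem.Dict.items_insert_of_contains _ v hc]
    simp only [List.map_map]
    congr 1
    funext p
    by_cases h1 : p.1 = k
    · simp [Function.comp, h1, beq_iff_eq, Ne.symm hne]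
    · by_cases h2 : p.1 = k'
      · simp [Function.comp, h2, beq_iff_eq, hne]
      · simp [Function.comp, h1, h2, beq_iff_eq]
  | false =>
    rw [PySem.Dict.items_insert_of_contains _ v hck,
        PySem.Dict.items_insert_of_not_contains _ u hc',
        PySem.Dict.items_insert_of_not_contains _ u (hck'.trans hc'),
        PySem.Dict.items_insert_of_contains _ v hc]
    simp [beq_iff_eq, hne]

/-- Overwriting a present key commutes with replaying inserts at other keys. -/
lemma pv_replay_overwrite (t : List (String × List Int)) (d : PySem.Dict String (List Int))
    (k : String) (v : List Int) (hc : d.contains k = true) (hk : k ∉ t.map Prod.fst) :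
    (pvReplay d t).insert k v = pvReplay (d.insert k v) t := by
  induction t generalizing d with
  | nil => rfl
  | cons p t ih =>
    simp only [List.map_cons, List.mem_cons, not_or] at hk
    show (pvReplay (d.insert p.1 p.2) t).insert k v = pvReplay ((d.insert k v).insert p.1 p.2) t
    rw [ih (d.insert p.1 p.2) (by simp [PySem.Dict.contains_insert, hc]) hk.2,
        pv_insert_comm d k p.1 p.2 v hc (fun h => hk.1 h.symm)]

/-- Replaying an association list with the entry at a present key replaced
    equals replaying the original and then overwriting that key. -/
lemma pv_replay_replace (l : List (String × List Int)) (d : PySem.Dict String (List Int))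
    (k : String) (v : List Int) (hmem : k ∈ l.map Prod.fst) (hnd : (l.map Prod.fst).Nodup) :
    pvReplay d (l.map (fun p => if (p.1 == k) = true then (k, v) else p)) =
      (pvReplay d l).insert k v := by
  induction l generalizing d with
  | nil => simp at hmem
  | cons p t ih =>
    simp only [List.map_cons, List.nodup_cons] at hnd
    by_cases h1 : p.1 = k
    · have hkt : k ∉ t.map Prod.fst := h1 ▸ hnd.1
      have hid : t.map (fun p => if (p.1 == k) = true then (k, v) else p) = t := by
        conv_rhs => rw [show t = t.map id from (List.map_id t).symm]
        refine List.map_congr_left (fun q hq => ?_)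
        have hq1 : q.1 ≠ k := fun h => hkt (h ▸ List.mem_map_of_mem hq)
        simp [beq_iff_eq, hq1]
      have hhead : (if (p.1 == k) = true then (k, v) else p) = (k, v) := by
        simp [h1]
      simp only [List.map_cons, hhead, hid]
      show pvReplay (d.insert k v) t = (pvReplay (d.insert p.1 p.2) t).insert k v
      rw [h1, pv_replay_overwrite t (d.insert k p.2) k v (by simp) hkt,
        PySem.Dict.insert_insert_self]
    · have hmt : k ∈ t.map Prod.fst := by
        rcases List.mem_cons.mp hmem with h | h
        · exact absurd h.symm h1
        · exact h
      have hhead : (if (p.1 == k) = true then (k, v) else p) = p := by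
        simp [beq_iff_eq, h1]
      simp only [List.map_cons, hhead]
      exact ih (d.insert p.1 p.2) hmt hnd.2

/-- The keys of a replayed dict stay without duplicates. -/
lemma pv_nodup_keys_replay (ps : List (String × List Int)) :
    (pvReplay PySem.Dict.empty ps).keys.Nodup :=
  PySem.Dict.nodup_keys_foldl_insert_key ps Prod.fst (fun _ p => p.2) PySem.Dict.empty
    PySem.Dict.nodup_keys_empty

/-- Normalizing an op list through a dict and replaying its items equals replaying the ops. -/
lemma pv_replay_items (ps : List (String × List Int)) (d : PySem.Dict String (List Int)) :
    pvReplay d (pvReplay PySem.Dict.empty ps).items = pvReplay d ps := by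
  induction ps using List.reverseRecOn with
  | nil => rfl
  | append_singleton ps p ih =>
    have hD : pvReplay PySem.Dict.empty (ps ++ [p]) = (pvReplay PySem.Dict.empty ps).insert p.1 p.2 := by
      simp [pvReplay]
    have hRHS : pvReplay d (ps ++ [p]) = (pvReplay d ps).insert p.1 p.2 := by
      simp [pvReplay]
    cases hc : (pvReplay PySem.Dict.empty ps).contains p.1 with
    | true =>
      rw [hD, hRHS, PySem.Dict.items_insert_of_contains _ p.2 hc,
        pv_replay_replace _ d p.1 p.2 ?_ ?_, ih]
      · have := (PySem.Dict.contains_iff_mem_keys _ p.1).mp hc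
        have hkeys : (pvReplay PySem.Dict.empty ps).keys
            = (pvReplay PySem.Dict.empty ps).items.map Prod.fst := rfl
        rwa [hkeys] at this
      · have := pv_nodup_keys_replay ps
        have hkeys : (pvReplay PySem.Dict.empty ps).keys
            = (pvReplay PySem.Dict.empty ps).items.map Prod.fst := rfl
        rwa [hkeys] at this
    | false =>
      rw [hD, hRHS, PySem.Dict.items_insert_of_not_contains _ p.2 hc]
      have : pvReplay d ((pvReplay PySem.Dict.empty ps).items ++ [p])
          = (pvReplay d (pvReplay PySem.Dict.empty ps).items).insert p.1 p.2 := by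
        simp [pvReplay]
      rw [this, ih]

/-- Replaying value-mapped ops from a value-mapped start produces the value-mapped items. -/
lemma pv_replay_map_vals (ps : List (String × List Int)) (g : List Int → List Int)
    (d d' : PySem.Dict String (List Int))
    (h : d'.items = d.items.map (fun p => (p.1, g p.2))) :
    (pvReplay d' (ps.map (fun p => (p.1, g p.2)))).items
      = (pvReplay d ps).items.map (fun p => (p.1, g p.2)) := by
  induction ps generalizing d d' with
  | nil => simpa [pvReplay] using h
  | cons p t ih =>
    simp only [List.map_cons, pvReplay, List.foldl_cons]
    refine ih (d.insert p.1 p.2) (d'.insert p.1 (g p.2)) ?_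
    have hkeys : d'.keys = d.keys := by
      have h1 : d'.keys = d'.items.map Prod.fst := rfl
      have h2 : d.keys = d.items.map Prod.fst := rfl
      rw [h1, h2, h, List.map_map]
      rfl
    have hcont : d'.contains p.1 = d.contains p.1 := by
      rw [PySem.Dict.contains_eq_decide_mem_keys, PySem.Dict.contains_eq_decide_mem_keys, hkeys]
    cases hc : d.contains p.1 with
    | false =>
      rw [PySem.Dict.items_insert_of_not_contains _ _ (hcont.trans hc),
        PySem.Dict.items_insert_of_not_contains _ _ hc, h]
      simp
    | true =>
      rw [PySem.Dict.items_insert_of_contains _ _ (hcont.trans hc),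
        PySem.Dict.items_insert_of_contains _ _ hc, h]
      simp only [List.map_map]
      congr 1
      funext q
      by_cases hq : q.1 = p.1
      · simp [Function.comp, hq]
      · simp [Function.comp, hq, beq_iff_eq]

/-- Total character length of a list of sentences. -/
def pvTot (xs : List String) : Int := (xs.map PySem.Str.len).sum

/-- The op list splits at any point, shifting the second part by the first part's total length. -/
lemma pv_ops_append (l1 l2 : List String) (off : Int) :
    pvOps off (l1 ++ l2) = pvOps off l1 ++ pvOps (off + pvTot l1) l2 := by
  induction l1 generalizing off with
  | nil => simp [pvOps, pvTot]
  | cons s t ih =>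
    simp only [List.cons_append, pvOps, ih (off + PySem.Str.len s), pvTot, List.map_cons, List.sum_cons]
    rw [show off + PySem.Str.len s + (t.map PySem.Str.len).sum
        = off + (PySem.Str.len s + (t.map PySem.Str.len).sum) from by ring]

/-- B's divide-and-conquer build produces the replay of A's op list and the total length. -/
lemma pv_build_eq_replay (xs : List String) :
    pvBuild xs = (pvReplay PySem.Dict.empty (pvOps 0 xs), pvTot xs) := by
  induction xs using pvBuild.induct with
  | case1 _ _ => simp [pvBuild, pvOps, pvReplay, pvTot]
  | case2 s tail h1 _ =>
    have htail : tail = [] := by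
      cases tail with
      | nil => rfl
      | cons a b => simp at h1
    subst htail
    simp [pvBuild, pvOps, pvReplay, pvTot]
  | case3 xs _h mid ihl ihr =>
    rw [pvBuild]
    simp only [dif_neg _h]
    rw [ihl, ihr]
    have hfold : (pvReplay PySem.Dict.empty (pvOps 0 (xs.drop mid))).items.foldl
        (fun d p => d.insert p.1 (p.2.map (· + pvTot (xs.take mid))))
        (pvReplay PySem.Dict.empty (pvOps 0 (xs.take mid)))
        = pvReplay (pvReplay PySem.Dict.empty (pvOps 0 (xs.take mid)))
            ((pvReplay PySem.Dict.empty (pvOps 0 (xs.drop mid))).items.map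
              (fun p => (p.1, p.2.map (· + pvTot (xs.take mid))))) := by
      simp [pvReplay, List.foldl_map]
    rw [hfold,
      show (pvReplay PySem.Dict.empty (pvOps 0 (xs.drop mid))).items.map
          (fun p => (p.1, p.2.map (· + pvTot (xs.take mid))))
        = (pvReplay PySem.Dict.empty ((pvOps 0 (xs.drop mid)).map
            (fun p => (p.1, p.2.map (· + pvTot (xs.take mid)))))).items from
        (pv_replay_map_vals (pvOps 0 (xs.drop mid)) _ PySem.Dict.empty PySem.Dict.empty rfl).symm,
      ← pv_ops_shift (xs.drop mid) 0 (pvTot (xs.take mid)), zero_add, pv_replay_items]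
    simp only [Prod.mk.injEq]
    refine ⟨?_, ?_⟩
    · rw [show pvReplay (pvReplay PySem.Dict.empty (pvOps 0 (xs.take mid)))
            (pvOps (pvTot (xs.take mid)) (xs.drop mid))
          = pvReplay PySem.Dict.empty
            (pvOps 0 (xs.take mid) ++ pvOps (pvTot (xs.take mid)) (xs.drop mid)) from by
          rw [pvReplay, pvReplay, pvReplay, List.foldl_append],
        show pvOps 0 (xs.take mid) ++ pvOps (pvTot (xs.take mid)) (xs.drop mid)
          = pvOps 0 (xs.take mid ++ xs.drop mid) from by rw [pv_ops_append, zero_add],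
        List.take_append_drop]
    · show pvTot (xs.take mid) + pvTot (xs.drop mid) = pvTot xs
      rw [show pvTot (xs.take mid) + pvTot (xs.drop mid) = pvTot (xs.take mid ++ xs.drop mid) from by
          simp [pvTot], List.take_append_drop]

-- ===== VERDICT (by name: the statement is the Claim_ definition above) =====
theorem get_sentence_dict_spec : Claim_equal_get_sentence_dict := by
  intro sentences _
  unfold Spec_get_sentence_dict get_sentence_dict get_sentence_dict_alt
  rw [pv_A_eq_replay sentences 0 PySem.Dict.empty, pv_build_eq_replay sentences]
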